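-- pv_equiv track=rewrite | github.com/FSpaans2021/Stage | main.py | remove_unnecessary_words
-- ===== SOURCE A (Python) =====
-- def remove_unnecessary_words(both_texts):
--     unnecessary_words = ["the", "a", "and", "from", "is", "there", "as", "this", "to", "of", "are", "on", "which", "in",
--                          "well", "with"]
--
--     new_list_both_texts = []
--     for i in both_texts:
--         if i not in unnecessary_words:
--             new_list_both_texts.append(i)
--
--     final_new_list_both_texts = list(dict.fromkeys(new_list_both_texts))
--
--     return final_new_list_both_texts
-- ===== SOURCE B (Python) =====
-- def remove_unnecessary_words(both_texts):
--     unnecessary_words = ["the", "a", "and", "from", "is", "there", "as", "this", "to", "of", "are", "on", "which", "in",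
--                          "well", "with"]
--     # Build the answer back-to-front: walk the words from last to first; a non-stopword
--     # is prepended to the result, and any later duplicate of it already in the result is
--     # dropped. No seen-set and no dict: the result itself is the only state.
--     result = []
--     for word in reversed(both_texts):
--         if word in unnecessary_words:
--             continue
--         result = [word] + [x for x in result if x != word]
--     return result
-- ===== Notes on version B (the rewrite author's own statement) =====
-- stated objective: alternative
-- what changed: Instead of A's two forward passes (stopword filter, then dict.fromkeys dedup), B walks the list back-to-front and rebuilds the result at each step, prepending the word and deleting its later duplicates from the partial result, so the only state is the output list itself.
import Mathlib
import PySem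

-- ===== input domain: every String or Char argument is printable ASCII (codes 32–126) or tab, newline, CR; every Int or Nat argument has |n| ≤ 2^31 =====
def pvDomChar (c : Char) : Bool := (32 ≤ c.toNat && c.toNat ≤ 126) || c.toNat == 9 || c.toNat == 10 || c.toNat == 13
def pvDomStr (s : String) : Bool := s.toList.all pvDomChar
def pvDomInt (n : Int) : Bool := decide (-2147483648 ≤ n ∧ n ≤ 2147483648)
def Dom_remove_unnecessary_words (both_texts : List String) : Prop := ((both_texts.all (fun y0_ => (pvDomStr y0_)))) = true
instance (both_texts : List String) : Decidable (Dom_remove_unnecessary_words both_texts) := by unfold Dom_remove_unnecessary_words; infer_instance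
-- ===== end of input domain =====

-- B rebuilds the result back-to-front (prepend each non-stopword, deleting its later duplicates from the partial result) instead of A's filter pass followed by dict.fromkeys; alternative decomposition, same observable result.


-- the stopword constant both Pythons spell out locally
def pvUnnecessaryWords : List String :=
  ["the", "a", "and", "from", "is", "there", "as", "this", "to", "of", "are", "on", "which", "in",
   "well", "with"]

-- ===== PORT A =====
-- two passes: a filter loop building new_list_both_texts, then list(dict.fromkeys(...)) = PySem.List.dedup
def remove_unnecessary_words (both_texts : List String) : List String :=
  PySem.List.dedup
    (both_texts.foldl
      (fun acc i => if pvUnnecessaryWords.contains i then acc else acc ++ [i]) [])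

-- ===== PORT B =====
-- one backwards pass: 'for word in reversed(both_texts)' = foldl over the reversed list;
-- the step prepends the word and drops its later duplicates from the partial result
def remove_unnecessary_words_alt (both_texts : List String) : List String :=
  both_texts.reverse.foldl
    (fun result word =>
      if pvUnnecessaryWords.contains word then result
      else word :: result.filter (fun x => x ≠ word))
    []

-- ===== PRECONDITION & SPEC =====
def Spec_remove_unnecessary_words (both_texts : List String) (out : List String) : Prop := out = remove_unnecessary_words_alt both_texts
instance (both_texts : List String) (out : List String) : Decidable (Spec_remove_unnecessary_words both_texts out) := by unfold Spec_remove_unnecessary_words; infer_instance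

-- ===== CLAIM (what is proved, stated in full; the proofs are below) =====
def Claim_equal_remove_unnecessary_words : Prop := ∀ (both_texts : List String), Dom_remove_unnecessary_words both_texts → Spec_remove_unnecessary_words both_texts (remove_unnecessary_words both_texts)

-- ===== LEMMAS AND PROOFS =====

-- A's filter loop is List.filter
theorem pv_filter_loop (xs acc : List String) :
    xs.foldl (fun acc i => if pvUnnecessaryWords.contains i then acc else acc ++ [i]) acc
      = acc ++ xs.filter (fun i => !pvUnnecessaryWords.contains i) := by
  induction xs generalizing acc with
  | nil => simp
  | cons x xs ih =>
    rw [List.foldl_cons, List.filter_cons]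
    by_cases h : pvUnnecessaryWords.contains x = true
    · simp only [h, Bool.not_true, Bool.false_eq_true, reduceIte, ih]
    · simp only [Bool.not_eq_true] at h
      simp only [h, Bool.not_false, Bool.false_eq_true, reduceIte, ih, List.append_assoc,
        List.singleton_append]

-- back-to-front dedup (no stopword test), as a foldr
def pvBackDedup (xs : List String) : List String :=
  xs.foldr (fun w res => w :: res.filter (fun x => x ≠ w)) []

-- B's fold with the stopword test interleaved is back-to-front dedup of the filtered list
theorem pv_alt_eq_backDedup (xs : List String) :
    remove_unnecessary_words_alt xs
      = pvBackDedup (xs.filter (fun i => !pvUnnecessaryWords.contains i)) := by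
  unfold remove_unnecessary_words_alt pvBackDedup
  rw [List.foldl_reverse]
  induction xs with
  | nil => rfl
  | cons x xs ih =>
    rw [List.foldr_cons, List.filter_cons]
    by_cases h : pvUnnecessaryWords.contains x = true
    · simp only [h, reduceIte, Bool.not_true, Bool.false_eq_true, ih]
    · simp only [Bool.not_eq_true] at h
      simp only [h, Bool.false_eq_true, reduceIte, Bool.not_false, ih, List.foldr_cons]

-- first-occurrence characterisation of Set.add folds: the seen elements only mask
theorem pv_foldl_add (ys : List String) (s : PySem.Set String) :
    ys.foldl PySem.Set.add s
      = s ++ (pvBackDedup ys).filter (fun w => !PySem.Set.contains s w) := by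
  induction ys generalizing s with
  | nil => simp [pvBackDedup]
  | cons y ys ih =>
    rw [List.foldl_cons, ih]
    show _ = s ++ (List.filter _ (y :: (pvBackDedup ys).filter (fun x => x ≠ y)))
    rw [List.filter_cons]
    simp only [PySem.Set.add, PySem.Set.contains]
    rcases (List.contains s y).eq_false_or_eq_true with hc | hc
    · -- y already seen: dropped, and the mask on later duplicates is unchanged
      simp only [hc, Bool.not_true, Bool.false_eq_true, reduceIte, List.filter_filter]
      congr 1
      apply List.filter_congr
      intro w _
      by_cases hw : w = y
      · subst hw
        have hm : w ∈ s := by simpa using hc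
        simp [hm]
      · simp [hw]
    · -- y not yet seen: it is appended, and it newly masks later duplicates
      simp only [hc, Bool.not_false, Bool.false_eq_true, reduceIte, List.filter_filter]
      rw [List.append_assoc, List.singleton_append]
      congr 2
      apply List.filter_congr
      intro w _
      show (!(s ++ [y]).contains w) = (!s.contains w && decide (w ≠ y))
      by_cases hw : w = y
      · subst hw; simp_all
      · simp_all [Ne.symm]

-- hence back-to-front dedup computes PySem's first-occurrence dedup
theorem pv_backDedup_eq_dedup (ys : List String) :
    pvBackDedup ys = PySem.List.dedup ys := by
  rw [PySem.List.dedup_eq_ofList, PySem.Set.ofList_eq_foldl, pv_foldl_add]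
  simp [PySem.Set.contains]

-- ===== VERDICT (by name: the statement is the Claim_ definition above) =====
theorem remove_unnecessary_words_spec : Claim_equal_remove_unnecessary_words := by
  intro both_texts _
  show remove_unnecessary_words both_texts = remove_unnecessary_words_alt both_texts
  rw [pv_alt_eq_backDedup, pv_backDedup_eq_dedup]
  unfold remove_unnecessary_words
  rw [pv_filter_loop, List.nil_append]
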